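-- pv_equiv track=rewrite | github.com/Liwenbin1996/Data_Structures_and_Algorithms | OtherQuestion.py | rightOne1
-- ===== SOURCE A (Python) =====
-- def rightOne1(num):
--     if num < 1:
--         return -1
--     res = 0
--     while num != 0:
--         num >>= 1
--         res += num
--     return res
-- ===== SOURCE B (Python) =====
-- def rightOne1(num):
--     if num < 1:
--         return -1
--     return num - bin(num).count('1')
-- ===== Notes on version B (the rewrite author's own statement) =====
-- stated objective: simpler
-- what changed: Replaces the accumulating right-shift while-loop with the closed form num - popcount(num).
import Mathlib
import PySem

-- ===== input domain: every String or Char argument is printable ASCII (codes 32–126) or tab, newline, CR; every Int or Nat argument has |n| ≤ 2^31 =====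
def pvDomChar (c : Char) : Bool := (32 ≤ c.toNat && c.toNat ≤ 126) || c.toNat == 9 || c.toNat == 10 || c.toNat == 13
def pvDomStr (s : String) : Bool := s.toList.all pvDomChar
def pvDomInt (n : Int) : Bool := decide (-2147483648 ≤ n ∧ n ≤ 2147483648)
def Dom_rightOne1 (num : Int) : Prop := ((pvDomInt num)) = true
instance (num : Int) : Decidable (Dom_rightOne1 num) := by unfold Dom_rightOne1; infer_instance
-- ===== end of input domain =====

-- B replaces A's accumulating right-shift loop with the closed form num - popcount(num); objective: simpler.

-- ===== PORT A =====
-- A's loop runs only when num ≥ 1, so the state is carried as a Nat; '>>= 1' on a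
-- non-negative int is exactly Nat division by 2.
def rightOne1Loop (n : Nat) (res : Int) : Int :=
  if n = 0 then res else rightOne1Loop (n / 2) (res + (n / 2 : Nat))

def rightOne1 (num : Int) : Int :=
  if num < 1 then -1 else rightOne1Loop num.toNat 0

-- ===== PORT B =====
-- popcount of a non-negative integer, = bin(num).count('1') in Source B (exact on Nat).
def rightOne1Popc (n : Nat) : Nat :=
  if n = 0 then 0 else n % 2 + rightOne1Popc (n / 2)

def rightOne1_alt (num : Int) : Int :=
  if num < 1 then -1 else num - (rightOne1Popc num.toNat : Nat)

-- ===== PRECONDITION & SPEC =====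
def Spec_rightOne1 (num : Int) (out : Int) : Prop := out = rightOne1_alt num
instance (num : Int) (out : Int) : Decidable (Spec_rightOne1 num out) := by unfold Spec_rightOne1; infer_instance

-- ===== CLAIM (what is proved, stated in full; the proofs are below) =====
def Claim_equal_rightOne1 : Prop := ∀ (num : Int), Dom_rightOne1 num → Spec_rightOne1 num (rightOne1 num)

-- ===== LEMMAS AND PROOFS =====
theorem rightOne1Loop_closed (n : Nat) (res : Int) :
    rightOne1Loop n res = res + (n : Int) - (rightOne1Popc n : Nat) := by
  induction n using Nat.strong_induction_on generalizing res with
  | _ n ih =>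
    rw [rightOne1Loop, rightOne1Popc]
    by_cases h : n = 0
    · simp [h]
    · simp only [h, if_false]
      rw [ih (n / 2) (Nat.div_lt_self (Nat.pos_of_ne_zero h) (by norm_num))]
      have h2 : n % 2 + 2 * (n / 2) = n := Nat.mod_add_div n 2
      push_cast
      omega

-- ===== VERDICT (by name: the statement is the Claim_ definition above) =====
theorem rightOne1_spec : Claim_equal_rightOne1 := by
  intro num _
  unfold Spec_rightOne1 rightOne1 rightOne1_alt
  by_cases h : num < 1
  · simp [h]
  · simp only [h, if_false]
    rw [rightOne1Loop_closed]
    omega
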